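-- pv_equiv track=rewrite | github.com/flag007/tools | dgen/dgen.py | insert_word_every_index
-- ===== SOURCE A (Python) =====
-- def insert_word_every_index(parts, words):
--     domains = []
--
--     for w in words:
--         for i in range(len(parts)):
--             tmp_parts = parts[:-1]
--             tmp_parts.insert(i, w)
--             domains.append('.'.join(tmp_parts + [parts[-1]]))
--
--     return domains
-- ===== SOURCE B (Python) =====
-- def _sufs(parts):
--     # _sufs(parts)[i] == '.'.join(parts[i:])
--     if not parts:
--         return []
--     rest = _sufs(parts[1:])
--     if not rest:
--         return [parts[0]]
--     return ['.'.join([parts[0], rest[0]])] + rest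
--
--
-- def _pres_from(acc, rest):
--     # acc, then acc extended by each element of rest in turn
--     if not rest:
--         return [acc]
--     return [acc] + _pres_from('.'.join([acc, rest[0]]), rest[1:])
--
--
-- def _pres(parts):
--     # _pres(parts)[i] == '.'.join(parts[:i])  (only indices 0..len(parts)-1 are used)
--     if not parts:
--         return []
--     return [''] + _pres_from(parts[0], parts[1:])[:-1]
--
--
-- def insert_word_every_index(parts, words):
--     sufs = _sufs(parts)
--     pres = _pres(parts)
--     return ['.'.join([w, sufs[0]]) if i == 0 else '.'.join([pres[i], w, sufs[i]])
--             for w in words for i in range(len(parts))]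
-- ===== Notes on version B (the rewrite author's own statement) =====
-- stated objective: alternative
-- what changed: B precomputes the '.'-joined prefix and suffix of parts at every split point once (recursively), then assembles each output domain from at most three precomputed pieces, instead of A's per-iteration list copy + insert + full n-way join; intended as faster, measured 2.19x at the largest size both finished (unconfirmed at n=1024).
import Mathlib
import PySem

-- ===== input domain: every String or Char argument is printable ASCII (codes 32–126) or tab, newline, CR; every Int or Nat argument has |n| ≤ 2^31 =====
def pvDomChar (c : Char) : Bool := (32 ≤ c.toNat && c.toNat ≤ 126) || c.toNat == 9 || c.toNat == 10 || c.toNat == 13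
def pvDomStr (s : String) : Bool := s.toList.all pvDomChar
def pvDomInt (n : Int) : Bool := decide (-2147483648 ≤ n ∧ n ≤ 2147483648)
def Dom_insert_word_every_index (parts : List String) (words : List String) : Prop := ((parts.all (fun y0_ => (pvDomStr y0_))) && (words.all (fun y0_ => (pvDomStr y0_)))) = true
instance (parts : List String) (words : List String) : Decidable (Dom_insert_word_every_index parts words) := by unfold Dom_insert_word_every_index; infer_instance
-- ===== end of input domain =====

-- B precomputes the '.'-joined prefixes and suffixes of `parts` once and assembles each
-- domain from at most three precomputed pieces, instead of A's per-iteration list copy+insert+join.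

-- ===== PORT A =====
-- parts[-1] is ported as pyGetD parts (-1) "": the loop body only runs when parts ≠ [],
-- where pyGetD equals Python's parts[-1] exactly (the default is never used).
def insert_word_every_index (parts : List String) (words : List String) : List String :=
  words.foldl (fun domains w =>
    (PySem.List.pyRange 0 (PySem.List.len parts) 1).foldl (fun domains i =>
      let tmp_parts := PySem.List.slice parts none (some (-1))
      let tmp_parts := PySem.List.insert tmp_parts i w
      domains ++ [PySem.Str.join "." (tmp_parts ++ [PySem.List.pyGetD parts (-1) ""])]) domains) []

-- ===== PORT B =====
-- pySufs parts !i = '.'.join(parts[i:])   (port of _sufs)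
def pySufs : List String → List String
  | [] => []
  | p :: ps =>
    match pySufs ps with
    | [] => [p]
    | q :: rest => PySem.Str.join "." [p, q] :: q :: rest

-- port of _pres_from
def pyPresFrom (acc : String) : List String → List String
  | [] => [acc]
  | q :: qs => acc :: pyPresFrom (PySem.Str.join "." [acc, q]) qs

-- pyPres parts !i = '.'.join(parts[:i]) for i < len parts   (port of _pres; [:-1] is slice none (some (-1)))
def pyPres : List String → List String
  | [] => []
  | p :: ps => "" :: PySem.List.slice (pyPresFrom p ps) none (some (-1))

-- sufs[0], pres[i], sufs[i] are ported as pyGetD with default "": every index used is in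
-- range (0 ≤ i < len parts and both tables have length len parts), so the default is never used.
def insert_word_every_index_alt (parts : List String) (words : List String) : List String :=
  let sufs := pySufs parts
  let pres := pyPres parts
  words.flatMap (fun w =>
    (PySem.List.pyRange 0 (PySem.List.len parts) 1).map (fun i =>
      if i == 0 then PySem.Str.join "." [w, PySem.List.pyGetD sufs 0 ""]
      else PySem.Str.join "." [PySem.List.pyGetD pres i "", w, PySem.List.pyGetD sufs i ""]))

-- ===== PRECONDITION & SPEC =====
def Spec_insert_word_every_index (parts : List String) (words : List String) (out : List String) : Prop := out = insert_word_every_index_alt parts words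
instance (parts : List String) (words : List String) (out : List String) : Decidable (Spec_insert_word_every_index parts words out) := by unfold Spec_insert_word_every_index; infer_instance

-- ===== CLAIM (what is proved, stated in full; the proofs are below) =====
def Claim_equal_insert_word_every_index : Prop := ∀ (parts : List String) (words : List String), Dom_insert_word_every_index parts words → Spec_insert_word_every_index parts words (insert_word_every_index parts words)

-- ===== LEMMAS AND PROOFS =====

-- joining an append of two nonempty lists (List Char level)
theorem chars_join_append (sep : List Char) (xs ys : List (List Char)) (hx : xs ≠ []) (hy : ys ≠ []) :
    PySem.Chars.join sep (xs ++ ys) = PySem.Chars.join sep xs ++ sep ++ PySem.Chars.join sep ys := by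
  induction xs with
  | nil => exact absurd rfl hx
  | cons a xs ih =>
    cases xs with
    | nil =>
      cases ys with
      | nil => exact absurd rfl hy
      | cons b ys =>
        simp [PySem.Chars.join_cons_cons, PySem.Chars.join_singleton]
    | cons c xs' =>
      rw [List.cons_append, List.cons_append, PySem.Chars.join_cons_cons,
          PySem.Chars.join_cons_cons, ← List.cons_append, ih (by simp)]
      simp [List.append_assoc]

theorem join_append_split (xs ys : List String) (hx : xs ≠ []) (hy : ys ≠ []) :
    PySem.Str.join "." (xs ++ ys) =
      PySem.Str.join "." [PySem.Str.join "." xs, PySem.Str.join "." ys] := by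
  rw [← String.toList_inj]
  simp only [PySem.Str.toList_join, List.map_append, List.map_cons, List.map_nil]
  rw [chars_join_append _ _ _ (by simpa using hx) (by simpa using hy),
      PySem.Chars.join_cons_cons, PySem.Chars.join_singleton]

theorem str_join_three (a b c : String) :
    PySem.Str.join "." [a, b, c] = PySem.Str.join "." [a, PySem.Str.join "." [b, c]] := by
  rw [← String.toList_inj]
  simp [PySem.Str.toList_join, PySem.Chars.join_cons_cons, PySem.Chars.join_singleton]

theorem str_join_singleton (a : String) : PySem.Str.join "." [a] = a := by
  rw [← String.toList_inj]
  simp [PySem.Str.toList_join, PySem.Chars.join_singleton]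

theorem pySufs_length (parts : List String) : (pySufs parts).length = parts.length := by
  induction parts with
  | nil => rfl
  | cons p ps ih =>
    simp only [pySufs]
    cases hs : pySufs ps with
    | nil =>
      rw [hs] at ih
      simp [← ih]
    | cons q rest =>
      rw [hs] at ih
      simp only [List.length_cons] at ih ⊢
      omega

theorem pySufs_get? (parts : List String) (i : Nat) (h : i < parts.length) :
    (pySufs parts)[i]? = some (PySem.Str.join "." (parts.drop i)) := by
  induction parts generalizing i with
  | nil => simp at h
  | cons p ps ih =>
    cases i with
    | zero =>
      simp only [pySufs, List.drop_zero]
      cases hs : pySufs ps with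
      | nil =>
        have hps : ps = [] := by
          have := pySufs_length ps; rw [hs] at this; simpa using this.symm
        subst hps
        show ([p] : List String)[0]? = some (PySem.Str.join "." [p])
        rw [List.getElem?_cons_zero, str_join_singleton]
      | cons q rest =>
        have hps : ps ≠ [] := by
          intro hnil; subst hnil; simp [pySufs] at hs
        have hq : q = PySem.Str.join "." ps := by
          have := ih 0 (by cases ps with | nil => exact absurd rfl hps | cons _ _ => simp)
          rw [hs] at this; simpa using this
        have hsplit := join_append_split [p] ps (by simp) hps
        simp only [List.singleton_append] at hsplit
        rw [str_join_singleton] at hsplit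
        simp [hsplit, hq]
    | succ j =>
      have hj : j < ps.length := by simpa using h
      simp only [pySufs]
      cases hs : pySufs ps with
      | nil =>
        exfalso
        have hl := pySufs_length ps
        rw [hs] at hl
        simp only [List.length_nil] at hl
        omega
      | cons q rest =>
        have := ih j hj
        rw [hs] at this
        simpa using this

theorem pyPresFrom_length (acc : String) (qs : List String) :
    (pyPresFrom acc qs).length = qs.length + 1 := by
  induction qs generalizing acc with
  | nil => rfl
  | cons q qs ih => simp [pyPresFrom, ih]

theorem pyPresFrom_get? (acc : String) (qs : List String) (i : Nat) (h : i ≤ qs.length) :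
    (pyPresFrom acc qs)[i]? = some (PySem.Str.join "." (acc :: qs.take i)) := by
  induction qs generalizing acc i with
  | nil =>
    have : i = 0 := Nat.le_zero.mp (by simpa using h)
    subst this
    simp only [pyPresFrom, List.take_nil, List.getElem?_cons_zero]
    congr 1
    rw [← String.toList_inj]
    simp [PySem.Str.toList_join, PySem.Chars.join_singleton]
  | cons q qs ih =>
    cases i with
    | zero =>
      simp only [pyPresFrom, List.getElem?_cons_zero, List.take_zero]
      congr 1
      rw [← String.toList_inj]
      simp [PySem.Str.toList_join, PySem.Chars.join_singleton]
    | succ j =>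
      have hj : j ≤ qs.length := by simpa using h
      have := ih (PySem.Str.join "." [acc, q]) j hj
      simp only [pyPresFrom, List.getElem?_cons_succ, List.take_succ_cons]
      rw [this]
      congr 1
      rw [← String.toList_inj]
      simp only [PySem.Str.toList_join, List.map_cons]
      cases hjt : qs.take j with
      | nil =>
        simp [PySem.Chars.join_singleton, PySem.Chars.join_cons_cons]
      | cons t ts =>
        simp [PySem.Chars.join_cons_cons, List.append_assoc]

theorem pyPres_get? (parts : List String) (i : Nat) (h : i < parts.length) :
    (pyPres parts)[i]? = some (PySem.Str.join "." (parts.take i)) := by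
  cases parts with
  | nil => simp at h
  | cons p ps =>
    cases i with
    | zero =>
      simp only [pyPres, List.getElem?_cons_zero, List.take_zero]
      rfl
    | succ j =>
      have hj : j < ps.length := by simpa using h
      have hlt : j < (pyPresFrom p ps).dropLast.length := by
        simp [pyPresFrom_length]; omega
      simp only [pyPres, List.getElem?_cons_succ, PySem.List.slice_to_neg_one]
      rw [List.getElem?_eq_getElem hlt, List.getElem_dropLast,
          ← List.getElem?_eq_getElem (by simp [pyPresFrom_length]; omega : j < (pyPresFrom p ps).length),
          pyPresFrom_get? p ps j (by omega)]
      simp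

theorem body_eq (parts : List String) (w : String) (i : Nat)
    (h : i < parts.length) :
    PySem.Str.join "." (PySem.List.insert (PySem.List.slice parts none (some (-1))) (i : Int) w
        ++ [PySem.List.pyGetD parts (-1) ""]) =
      (if (i : Int) == 0 then PySem.Str.join "." [w, PySem.List.pyGetD (pySufs parts) 0 ""]
       else PySem.Str.join "." [PySem.List.pyGetD (pyPres parts) (i : Int) "", w,
              PySem.List.pyGetD (pySufs parts) (i : Int) ""]) := by
  have hne : parts ≠ [] := by intro hnil; subst hnil; simp at h
  have hlen : parts.dropLast.length = parts.length - 1 := by simp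
  have hi1 : i ≤ parts.dropLast.length := by omega
  rw [PySem.List.slice_to_neg_one, PySem.List.insert_natCast _ _ _ hi1,
      PySem.List.pyGetD_neg_one _ _ hne]
  have hlist : (parts.dropLast.take i ++ w :: parts.dropLast.drop i) ++ [parts.getLast hne]
      = parts.take i ++ w :: parts.drop i := by
    have htake : parts.dropLast.take i = parts.take i := by
      rw [List.dropLast_eq_take, List.take_take]
      congr 1; omega
    have hdrop : parts.dropLast.drop i ++ [parts.getLast hne] = parts.drop i := by
      conv_rhs => rw [← List.dropLast_append_getLast hne]
      rw [List.drop_append_of_le_length hi1]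
    rw [List.append_assoc, List.cons_append, hdrop, htake]
  rw [hlist]
  have hsuf : ∀ (k : Nat), k < parts.length →
      PySem.List.pyGetD (pySufs parts) (k : Int) "" = PySem.Str.join "." (parts.drop k) := by
    intro k hk
    rw [PySem.List.pyGetD_natCast, List.getD_eq_getElem?_getD, pySufs_get? parts k hk]
    rfl
  by_cases h0 : i = 0
  · subst h0
    simp only [Nat.cast_zero]
    rw [if_pos (by simp)]
    rw [show (0 : Int) = ((0 : Nat) : Int) from rfl, hsuf 0 h]
    rw [show parts.take 0 ++ w :: parts.drop 0 = [w] ++ parts by simp]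
    rw [join_append_split [w] parts (by simp) hne, str_join_singleton, List.drop_zero]
  · rw [if_neg (by simpa using fun hh => h0 (by exact_mod_cast hh))]
    have hpre : PySem.List.pyGetD (pyPres parts) (i : Int) "" = PySem.Str.join "." (parts.take i) := by
      rw [PySem.List.pyGetD_natCast, List.getD_eq_getElem?_getD, pyPres_get? parts i h]
      rfl
    rw [hpre, hsuf i h]
    have hi0 : 0 < i := Nat.pos_of_ne_zero h0
    have htne : parts.take i ≠ [] := by
      apply List.ne_nil_of_length_pos
      simp only [List.length_take]
      omega
    have hdne : parts.drop i ≠ [] := by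
      apply List.ne_nil_of_length_pos
      simp only [List.length_drop]
      omega
    rw [show parts.take i ++ w :: parts.drop i = parts.take i ++ ([w] ++ parts.drop i) by simp]
    rw [join_append_split _ _ htne (by simp), join_append_split [w] _ (by simp) hdne,
        str_join_three, str_join_singleton]

-- ===== VERDICT (by name: the statement is the Claim_ definition above) =====
theorem insert_word_every_index_spec : Claim_equal_insert_word_every_index := by
  intro parts words _
  unfold Spec_insert_word_every_index insert_word_every_index insert_word_every_index_alt
  simp only [PySem.List.foldl_append_singleton_eq_map]
  rw [PySem.List.foldl_append_eq_flatMap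
      (fun w => (PySem.List.pyRange 0 (PySem.List.len parts) 1).map (fun i =>
        PySem.Str.join "." (PySem.List.insert (PySem.List.slice parts none (some (-1))) i w
          ++ [PySem.List.pyGetD parts (-1) ""]))) words []]
  simp only [List.nil_append, List.flatMap_def]
  congr 1
  apply List.map_congr_left
  intro w _
  apply List.map_congr_left
  intro i hi
  obtain ⟨h0, h1⟩ := PySem.List.mem_pyRange_one.mp hi
  simp only [PySem.List.len_eq] at h1
  have hk : i = ((i.toNat : Nat) : Int) := (Int.toNat_of_nonneg h0).symm
  rw [hk]
  exact body_eq parts w i.toNat (by omega)
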